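-- pv_equiv track=rewrite | github.com/raphaelPythonCpp/TETRIS | TETRIS_algorithme_NN_v2.py | nb_trous_cube
-- ===== SOURCE A (Python) =====
-- from collections import deque
--
-- dxy = [(1,0), (-1,0), (0,1)]
--
-- def nb_trous_cube(grille):
--     #cube 1*1 qui fait une BFS
--     nbLignes = len(grille)
--     nbColonnes = len(grille[0])
--     grilleVus = [[False]*nbColonnes for _ in range(nbLignes)]
--     file = deque([])
--     for x in range(nbColonnes):
--         if grille[0][x] is None:
--             file.append((x, 0))
--             grilleVus[0][x] = True
--     while file:
--         x,y = file.popleft()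
--         for dx,dy in dxy:
--             x2 = x+dx
--             y2 = y+dy
--             if (0 <= x2 < nbColonnes) and (0 <= y2 < nbLignes) and (grille[y2][x2] is None) and (not grilleVus[y2][x2]):
--                 grilleVus[y2][x2] = True
--                 file.append((x2,y2))
--     nbTrous = 0
--     for y in range(nbLignes):
--         for x in range(nbColonnes):
--             if (not grilleVus[y][x]) and (grille[y][x] is None):
--                 nbTrous += 1
--     return nbTrous
-- ===== SOURCE B (Python) =====
-- # Row sweep: reachability from the top propagates only down and sideways, so a
-- # single top-to-bottom sweep with two horizontal scan passes per row replaces the BFS.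
--
-- def _scan(row, reach):
--     # propagate reachability rightward through contiguous empty cells
--     out = []
--     prev = False
--     for c, r in zip(row, reach):
--         cur = r or (c is None and prev)
--         out.append(cur)
--         prev = cur
--     return out
--
--
-- def nb_trous_cube(grille):
--     width = len(grille[0])
--     reach = [False] * width
--     first = True
--     holes = 0
--     for full_row in grille:
--         row = full_row[:width]
--         seed = [(c is None) and (first or r) for c, r in zip(row, reach)]
--         t = _scan(row, seed)
--         reach = _scan(row[::-1], t[::-1])[::-1]
--         holes += sum(1 for c, r in zip(row, reach) if c is None and not r)
--         first = False
--     return holes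
-- ===== Notes on version B (the rewrite author's own statement) =====
-- stated objective: alternative
-- what changed: Replaces the queue-based BFS over the whole grid by a single top-to-bottom row sweep that keeps one boolean 'reachable' row and closes it horizontally with a left-to-right and a right-to-left scan per row (valid because the move set has no 'up' move), counting holes on the fly.
import Mathlib
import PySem

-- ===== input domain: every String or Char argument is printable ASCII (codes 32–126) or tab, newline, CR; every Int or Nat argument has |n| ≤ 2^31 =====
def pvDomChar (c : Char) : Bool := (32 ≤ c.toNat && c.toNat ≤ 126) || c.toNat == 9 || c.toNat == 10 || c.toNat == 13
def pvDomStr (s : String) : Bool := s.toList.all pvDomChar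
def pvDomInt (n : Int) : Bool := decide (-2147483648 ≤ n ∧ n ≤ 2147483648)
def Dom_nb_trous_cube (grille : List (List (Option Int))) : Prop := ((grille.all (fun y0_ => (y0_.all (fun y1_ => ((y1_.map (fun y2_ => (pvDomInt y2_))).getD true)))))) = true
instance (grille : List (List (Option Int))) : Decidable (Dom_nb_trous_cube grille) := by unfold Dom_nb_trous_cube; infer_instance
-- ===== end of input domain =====

-- B replaces A's queue BFS by a top-to-bottom row sweep (two horizontal scan passes per
-- row), valid because the move set has no upward move; same value, an alternative algorithm.

-- ===== PORT A =====
def pvDxy : List (Int × Int) := [(1,0), (-1,0), (0,1)]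

-- grille[y][x] is None (used only with indices already checked 0 ≤ · < bounds)
def pvIsEmpty (g : List (List (Option Int))) (y x : Int) : Bool :=
  match PySem.List.pyGet? g y with
  | some row =>
    match PySem.List.pyGet? row x with
    | some none => true
    | _ => false
  | none => false

-- grilleVus[y][x] (indices already checked in range)
def pvGetV (v : List (List Bool)) (y x : Int) : Bool :=
  match PySem.List.pyGet? v y with
  | some row => (PySem.List.pyGet? row x).getD false
  | none => false

-- grilleVus[y][x] = True
def pvSetV (v : List (List Bool)) (y x : Int) : List (List Bool) :=
  v.set y.toNat ((v.getD y.toNat []).set x.toNat true)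

-- body of the 'for dx,dy in dxy' loop
def pvBfsStep (g : List (List (Option Int))) (nbL nbC x y : Int)
    (st : List (List Bool) × List (Int × Int)) (d : Int × Int) :
    List (List Bool) × List (Int × Int) :=
  let x2 := x + d.1
  let y2 := y + d.2
  if (0 ≤ x2 ∧ x2 < nbC) ∧ (0 ≤ y2 ∧ y2 < nbL) ∧ pvIsEmpty g y2 x2 = true ∧ pvGetV st.1 y2 x2 = false then
    (pvSetV st.1 y2 x2, st.2 ++ [(x2, y2)])
  else st

-- the 'while file:' loop; fuel only makes it total (proved sufficient below)
def pvBfsLoop (g : List (List (Option Int))) (nbL nbC : Int) :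
    Nat → List (List Bool) → List (Int × Int) → List (List Bool)
  | _, vus, [] => vus
  | 0, vus, _ => vus
  | fuel+1, vus, (x, y) :: rest =>
    let st := pvDxy.foldl (pvBfsStep g nbL nbC x y) (vus, rest)
    pvBfsLoop g nbL nbC fuel st.1 st.2

def nb_trous_cube (grille : List (List (Option Int))) : Int :=
  let nbLignes : Int := grille.length
  let nbColonnes : Int := (grille.headD []).length
  let grilleVus : List (List Bool) :=
    List.replicate grille.length (List.replicate (grille.headD []).length false)
  let init : List (List Bool) × List (Int × Int) :=
    (PySem.List.pyRange 0 nbColonnes 1).foldl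
      (fun st x =>
        if PySem.List.pyGet? (grille.headD []) x = some none then
          (pvSetV st.1 0 x, st.2 ++ [(x, (0 : Int))])
        else st)
      (grilleVus, [])
  let vusF := pvBfsLoop grille nbLignes nbColonnes
      (4 * grille.length * (grille.headD []).length + (grille.headD []).length + 1)
      init.1 init.2
  (PySem.List.pyRange 0 nbLignes 1).foldl
    (fun acc y =>
      (PySem.List.pyRange 0 nbColonnes 1).foldl
        (fun acc x =>
          if pvGetV vusF y x = false ∧ pvIsEmpty grille y x = true then acc + 1 else acc)
        acc)
    0

-- ===== PORT B =====
-- _scan: propagate reachability rightward through contiguous empty cells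
def pvScan : List (Option Int × Bool) → Bool → List Bool
  | [], _ => []
  | (c, r) :: rest, prev =>
    let cur := r || (decide (c = none) && prev)
    cur :: pvScan rest cur

-- body of 'for full_row in grille' (state: reach, first, holes)
def pvRowStep (width : Nat) (st : List Bool × Bool × Int) (full_row : List (Option Int)) :
    List Bool × Bool × Int :=
  let row := full_row.take width
  let seed := (row.zip st.1).map (fun p => decide (p.1 = none) && (st.2.1 || p.2))
  let t := pvScan (row.zip seed) false
  let reach' := (pvScan (row.reverse.zip t.reverse) false).reverse
  let holes' := st.2.2 +
    ((row.zip reach').foldl (fun a p => if p.1 = none ∧ p.2 = false then a + 1 else a) 0)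
  (reach', false, holes')

def nb_trous_cube_alt (grille : List (List (Option Int))) : Int :=
  let width := (grille.headD []).length
  (grille.foldl (pvRowStep width) (List.replicate width false, true, 0)).2.2

-- ===== PRECONDITION & SPEC =====
-- Pre_ excludes exactly the inputs where A raises IndexError: the empty grid
-- (grille[0]) and grids with a row shorter than the first row (the final counting
-- loop indexes every row at all columns of the first row).
def Pre_nb_trous_cube (grille : List (List (Option Int))) : Prop :=
  grille ≠ [] ∧ ∀ r ∈ grille, (grille.headD []).length ≤ r.length
instance (grille : List (List (Option Int))) : Decidable (Pre_nb_trous_cube grille) := by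
  unfold Pre_nb_trous_cube; infer_instance

def pvWitness_nb_trous_cube : List (List (Option Int)) :=
  [[none, some 1, none], [some 2, none, none], [none, some 3, some 4]]

def Spec_nb_trous_cube (grille : List (List (Option Int))) (out : Int) : Prop :=
  out = nb_trous_cube_alt grille
instance (grille : List (List (Option Int))) (out : Int) : Decidable (Spec_nb_trous_cube grille out) := by
  unfold Spec_nb_trous_cube; infer_instance

-- ===== CLAIM (what is proved, stated in full; the proofs are below) =====
def Claim_equal_nb_trous_cube : Prop := ∀ (grille : List (List (Option Int))), Dom_nb_trous_cube grille → Pre_nb_trous_cube grille → Spec_nb_trous_cube grille (nb_trous_cube grille)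


-- ===== LEMMAS AND PROOFS =====

-- ---- common notions ----

-- cell (x,y) is inside the playing field (x < w) and empty
def pvCell (g : List (List (Option Int))) (w x y : Nat) : Bool :=
  decide (x < w) &&
    (match g[y]? with
     | some row => (match row[x]? with | some none => true | _ => false)
     | none => false)

-- cells reachable from the top row by the moves right, left, down
inductive PvReach (g : List (List (Option Int))) (w : Nat) : Nat → Nat → Prop
  | seed (x : Nat) : pvCell g w x 0 = true → PvReach g w x 0
  | down (x y : Nat) : PvReach g w x y → pvCell g w x (y+1) = true → PvReach g w x (y+1)
  | right (x y : Nat) : PvReach g w x y → pvCell g w (x+1) y = true → PvReach g w (x+1) y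
  | left (x y : Nat) : PvReach g w (x+1) y → pvCell g w x y = true → PvReach g w x y

-- the common reference count: holes = empty ∧ not reached (b = the "reached" predicate)
def pvCnt (g : List (List (Option Int))) (w : Nat) (b : Nat → Nat → Bool) (y : Nat) : Int :=
  ((List.range w).map (fun x => if pvCell g w x y = true ∧ b x y = false then (1:Int) else 0)).sum
def pvCount (g : List (List (Option Int))) (w h : Nat) (b : Nat → Nat → Bool) : Int :=
  ((List.range h).map (fun y => pvCnt g w b y)).sum

lemma pvCell_lt_w {g w x y} (h : pvCell g w x y = true) : x < w := by
  unfold pvCell at h; simp at h; exact h.1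

lemma pvCell_lt_h {g w x y} (h : pvCell g w x y = true) : y < g.length := by
  unfold pvCell at h
  rcases hg : g[y]? with _ | row
  · rw [hg] at h; simp at h
  · exact (List.getElem?_eq_some_iff.mp hg).1

-- ---- A side: visited matrix ----

def pvGetVN (v : List (List Bool)) (x y : Nat) : Bool := ((v[y]?.getD [])[x]?.getD false)
def pvSetVN (v : List (List Bool)) (x y : Nat) : List (List Bool) :=
  v.set y ((v.getD y []).set x true)
def pvShape (v : List (List Bool)) (w h : Nat) : Prop :=
  v.length = h ∧ ∀ r ∈ v, r.length = w
def pvFc (v : List (List Bool)) : Nat := (v.map (fun r => r.count false)).sum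

lemma pvGetV_eq {v : List (List Bool)} {y x : Int} (hy : 0 ≤ y) (hx : 0 ≤ x) :
    pvGetV v y x = pvGetVN v x.toNat y.toNat := by
  unfold pvGetV pvGetVN
  rw [PySem.List.pyGet?_of_nonneg v hy]
  cases h : v[y.toNat]? with
  | none => simp
  | some row => simp [PySem.List.pyGet?_of_nonneg row hx]

lemma pvSetV_eq {v : List (List Bool)} {y x : Int} :
    pvSetV v y x = pvSetVN v x.toNat y.toNat := rfl

lemma pvIsEmpty_eq {g : List (List (Option Int))} {w : Nat} {y x : Int}
    (hx0 : 0 ≤ x) (hx : x < (w:Int)) (hy0 : 0 ≤ y) :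
    pvIsEmpty g y x = pvCell g w x.toNat y.toNat := by
  unfold pvIsEmpty pvCell
  rw [PySem.List.pyGet?_of_nonneg g hy0]
  cases hg : g[y.toNat]? with
  | none => simp [(by omega : x.toNat < w)]
  | some row =>
    dsimp only
    rw [PySem.List.pyGet?_of_nonneg row hx0]
    simp only [decide_eq_true (show x.toNat < w by omega), Bool.true_and]

lemma pvRowD {v : List (List Bool)} {y : Nat} (hyl : y < v.length) :
    v.getD y [] = v[y] := by
  rw [List.getD_eq_getElem?_getD, List.getElem?_eq_getElem hyl]; rfl

lemma pvShape_set {v w h x y} (hs : pvShape v w h) (hy : y < h) :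
    pvShape (pvSetVN v x y) w h := by
  obtain ⟨hl, hr⟩ := hs
  refine ⟨by simp [pvSetVN, hl], ?_⟩
  intro r hrm
  rcases List.mem_or_eq_of_mem_set hrm with hm | he
  · exact hr r hm
  · subst he
    rw [pvRowD (by omega)]
    simp [hr _ (List.getElem_mem _)]

lemma pvGetVN_set_self {v w h x y} (hs : pvShape v w h) (hx : x < w) (hy : y < h) :
    pvGetVN (pvSetVN v x y) x y = true := by
  obtain ⟨hl, hr⟩ := hs
  have hyl : y < v.length := by omega
  have hxl : x < (v[y]).length := by rw [hr _ (List.getElem_mem _)]; omega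
  unfold pvGetVN pvSetVN
  rw [List.getElem?_set_self hyl]
  simp only [Option.getD_some]
  rw [pvRowD hyl, List.getElem?_set_self hxl]
  rfl

lemma pvGetVN_set_other {v x y x' y'} (hne : ¬ (x' = x ∧ y' = y)) :
    pvGetVN (pvSetVN v x y) x' y' = pvGetVN v x' y' := by
  unfold pvGetVN pvSetVN
  by_cases hy : y' = y
  · subst hy
    have hx : x ≠ x' := fun h => hne ⟨h.symm, rfl⟩
    by_cases hyl : y' < v.length
    · rw [List.getElem?_set_self hyl]
      simp only [Option.getD_some]
      rw [pvRowD hyl, List.getElem?_set_ne hx, List.getElem?_eq_getElem hyl]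
      rfl
    · rw [List.set_eq_of_length_le (by omega)]
  · rw [List.getElem?_set_ne (fun h => hy h.symm)]

lemma pvGetVN_mono_set {v x y x' y'} (h : pvGetVN v x' y' = true) :
    pvGetVN (pvSetVN v x y) x' y' = true := by
  by_cases he : x' = x ∧ y' = y
  · obtain ⟨h1, h2⟩ := he; subst h1; subst h2
    unfold pvGetVN at h ⊢
    unfold pvSetVN
    by_cases hyl : y' < v.length
    · rw [List.getElem?_set_self hyl]
      rw [List.getElem?_eq_getElem hyl] at h
      simp only [Option.getD_some] at h ⊢
      rw [pvRowD hyl]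
      rcases hx' : (v[y'])[x']? with _ | b
      · rw [hx'] at h; simp at h
      · have hxl : x' < (v[y']).length := (List.getElem?_eq_some_iff.mp hx').1
        rw [List.getElem?_set_self hxl]
        rfl
    · rw [List.set_eq_of_length_le (by omega)]
      exact h
  · rw [pvGetVN_set_other he]; exact h

lemma pvCount_false_set_true (l : List Bool) (x : Nat) (h : l[x]? = some false) :
    (l.set x true).count false + 1 = l.count false := by
  induction l generalizing x with
  | nil => simp at h
  | cons a l ih =>
    cases x with
    | zero =>
      simp at h; subst h
      simp
    | succ n =>
      simp at h
      have := ih n h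
      simp [List.count_cons, List.set]
      omega

lemma pvSum_set (l : List Nat) (n : Nat) (a : Nat) (hn : n < l.length) :
    (l.set n a).sum + l[n] = l.sum + a := by
  induction l generalizing n with
  | nil => simp at hn
  | cons b l ih =>
    cases n with
    | zero => simp [List.set]; omega
    | succ m =>
      have := ih m (by simpa using hn)
      simp [List.set]
      omega

lemma pvFc_set {v w h x y} (hs : pvShape v w h) (hx : x < w) (hy : y < h)
    (hf : pvGetVN v x y = false) : pvFc (pvSetVN v x y) + 1 = pvFc v := by
  obtain ⟨hl, hr⟩ := hs
  have hyl : y < v.length := by omega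
  have hxl : x < (v[y]).length := by rw [hr _ (List.getElem_mem _)]; omega
  have hfx : (v[y])[x]? = some false := by
    unfold pvGetVN at hf
    rw [List.getElem?_eq_getElem hyl] at hf
    simp only [Option.getD_some] at hf
    rw [List.getElem?_eq_getElem hxl] at hf ⊢
    simp only [Option.getD_some] at hf
    rw [hf]
  have hcount := pvCount_false_set_true (v[y]) x hfx
  unfold pvFc pvSetVN
  rw [pvRowD hyl, List.map_set]
  have hml : y < (v.map (fun r => r.count false)).length := by simpa using hyl
  have e1 := pvSum_set (v.map (fun r => r.count false)) y (((v[y]).set x true).count false) hml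
  simp only [List.getElem_map] at e1
  omega

-- ---- A side: BFS invariant ----

-- from (x,y) every admissible move into an empty cell is already marked
def pvClosedAt (g : List (List (Option Int))) (w : Nat) (v : List (List Bool)) (x y : Nat) : Prop :=
  (pvCell g w (x+1) y = true → pvGetVN v (x+1) y = true) ∧
  (∀ x', x = x' + 1 → pvCell g w x' y = true → pvGetVN v x' y = true) ∧
  (pvCell g w x (y+1) = true → pvGetVN v x (y+1) = true)

structure PvInv (g : List (List (Option Int))) (w h : Nat)
    (v : List (List Bool)) (q : List (Int × Int)) : Prop where
  shape : pvShape v w h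
  qmem : ∀ p ∈ q, ∃ x y : Nat, p = ((x : Int), (y : Int)) ∧
    pvCell g w x y = true ∧ pvGetVN v x y = true
  sound : ∀ x y, pvGetVN v x y = true → PvReach g w x y
  closed : ∀ x y : Nat, pvGetVN v x y = true →
    ((x : Int), (y : Int)) ∈ q ∨ pvClosedAt g w v x y

-- one admissible move from (x,y) is already satisfied (target marked if legal and empty)
def pvCM (g : List (List (Option Int))) (w : Nat) (v : List (List Bool))
    (x y : Nat) (d : Int × Int) : Prop :=
  ∀ a b : Nat, (a:Int) = (x:Int) + d.1 → (b:Int) = (y:Int) + d.2 →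
    pvCell g w a b = true → pvGetVN v a b = true

lemma pvCM_mono {g w v v' x y d}
    (hmono : ∀ a b, pvGetVN v a b = true → pvGetVN v' a b = true)
    (h : pvCM g w v x y d) : pvCM g w v' x y d :=
  fun a b ha hb hc => hmono a b (h a b ha hb hc)

lemma pvClosedAt_of_CM {g w v x y}
    (h1 : pvCM g w v x y (1,0)) (h2 : pvCM g w v x y (-1,0)) (h3 : pvCM g w v x y (0,1)) :
    pvClosedAt g w v x y := by
  refine ⟨fun hc => h1 (x+1) y (by push_cast; ring) (by push_cast; ring) hc, ?_, ?_⟩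
  · intro x' hx' hc
    exact h2 x' y (by subst hx'; push_cast; ring) (by push_cast; ring) hc
  · exact fun hc => h3 x (y+1) (by push_cast; ring) (by push_cast; ring) hc

lemma pvClosedAt_mono {g w v v' x y}
    (hmono : ∀ a b, pvGetVN v a b = true → pvGetVN v' a b = true)
    (h : pvClosedAt g w v x y) : pvClosedAt g w v' x y :=
  ⟨fun hc => hmono _ _ (h.1 hc), fun x' he hc => hmono _ _ (h.2.1 x' he hc),
   fun hc => hmono _ _ (h.2.2 hc)⟩

-- invariant carried through the 'for dx,dy in dxy' fold after popping (x,y)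
structure PvStepInv (g : List (List (Option Int))) (w h : Nat) (v0 : List (List Bool))
    (rest : List (Int × Int)) (N : Nat) (st : List (List Bool) × List (Int × Int)) : Prop where
  shape : pvShape st.1 w h
  mono : ∀ a b, pvGetVN v0 a b = true → pvGetVN st.1 a b = true
  qmem : ∀ p ∈ st.2, ∃ a b : Nat, p = ((a:Int),(b:Int)) ∧
    pvCell g w a b = true ∧ pvGetVN st.1 a b = true
  sound : ∀ a b, pvGetVN st.1 a b = true → PvReach g w a b
  fresh : ∀ a b : Nat, pvGetVN st.1 a b = true →
    pvGetVN v0 a b = true ∨ ((a:Int),(b:Int)) ∈ st.2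
  qsup : ∀ p ∈ rest, p ∈ st.2
  meas : 4 * pvFc st.1 + st.2.length ≤ N

lemma pvBfsStep_inv {g : List (List (Option Int))} {w h : Nat} {v0 rest N}
    (hh : h = g.length) (x y : Nat) (d : Int × Int) (hd : d ∈ pvDxy)
    (hreach : PvReach g w x y) (st : List (List Bool) × List (Int × Int))
    (hst : PvStepInv g w h v0 rest N st) :
    PvStepInv g w h v0 rest N (pvBfsStep g h w x y st d) ∧
    (∀ a b, pvGetVN st.1 a b = true → pvGetVN (pvBfsStep g h w x y st d).1 a b = true) ∧
    pvCM g w (pvBfsStep g h w x y st d).1 x y d := by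
  unfold pvBfsStep
  by_cases hg : (0 ≤ (x:Int) + d.1 ∧ (x:Int) + d.1 < (w:Int)) ∧
      (0 ≤ (y:Int) + d.2 ∧ (y:Int) + d.2 < (h:Int)) ∧
      pvIsEmpty g ((y:Int) + d.2) ((x:Int) + d.1) = true ∧
      pvGetV st.1 ((y:Int) + d.2) ((x:Int) + d.1) = false
  · rw [if_pos hg]
    obtain ⟨⟨hx0, hxw⟩, ⟨hy0, hyh⟩, hemp, hunm⟩ := hg
    obtain ⟨a, hae⟩ : ∃ a : Nat, (a:Int) = (x:Int) + d.1 := ⟨((x:Int)+d.1).toNat, by omega⟩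
    obtain ⟨b, hbe⟩ : ∃ b : Nat, (b:Int) = (y:Int) + d.2 := ⟨((y:Int)+d.2).toNat, by omega⟩
    have hcell : pvCell g w a b = true := by
      rw [← hae, ← hbe, pvIsEmpty_eq (w := w) (by omega) (by omega) (by omega)] at hemp
      simpa using hemp
    have hfalse : pvGetVN st.1 a b = false := by
      rw [← hae, ← hbe, pvGetV_eq (by omega) (by omega)] at hunm
      simpa using hunm
    have haw : a < w := by omega
    have hbh : b < h := by omega
    have hset : pvSetV st.1 ((y:Int) + d.2) ((x:Int) + d.1) = pvSetVN st.1 a b := by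
      rw [← hae, ← hbe, pvSetV_eq]
      simp
    rw [hset, ← hae, ← hbe]
    have hreach2 : PvReach g w a b := by
      simp only [pvDxy, List.mem_cons, List.not_mem_nil, or_false] at hd
      rcases hd with hd | hd | hd
      · -- d = (1,0) : move right
        subst hd
        have hax : a = x + 1 := by simp at hae; omega
        have hby : b = y := by simp at hbe; omega
        rw [hax, hby] at hcell ⊢
        exact PvReach.right x y hreach hcell
      · -- d = (-1,0) : move left
        subst hd
        have hax : x = a + 1 := by simp at hae; omega
        have hby : b = y := by simp at hbe; omega
        rw [hby] at hcell ⊢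
        rw [hax] at hreach
        exact PvReach.left a y hreach hcell
      · -- d = (0,1) : move down
        subst hd
        have hax : a = x := by simp at hae; omega
        have hby : b = y + 1 := by simp at hbe; omega
        rw [hax, hby] at hcell ⊢
        exact PvReach.down x y hreach hcell
    have hmonoset : ∀ a' b', pvGetVN st.1 a' b' = true → pvGetVN (pvSetVN st.1 a b) a' b' = true :=
      fun a' b' h' => pvGetVN_mono_set h'
    refine ⟨⟨pvShape_set hst.shape hbh, fun a' b' h' => hmonoset a' b' (hst.mono a' b' h'),
        ?_, ?_, ?_, ?_, ?_⟩, hmonoset, ?_⟩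
    · intro p hp
      rcases List.mem_append.mp hp with hp | hp
      · obtain ⟨a', b', hpe, hc', hm'⟩ := hst.qmem p hp
        exact ⟨a', b', hpe, hc', hmonoset a' b' hm'⟩
      · simp at hp
        exact ⟨a, b, by simp [hp, hae, hbe], hcell,
          pvGetVN_set_self hst.shape haw hbh⟩
    · intro a' b' h'
      by_cases he : a' = a ∧ b' = b
      · obtain ⟨h1, h2⟩ := he; subst h1; subst h2; exact hreach2
      · exact hst.sound a' b' (by rwa [pvGetVN_set_other he] at h')
    · intro a' b' h'
      by_cases he : a' = a ∧ b' = b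
      · obtain ⟨h1, h2⟩ := he; subst h1; subst h2
        right; exact List.mem_append.mpr (Or.inr (by simp [hae, hbe]))
      · rcases hst.fresh a' b' (by rwa [pvGetVN_set_other he] at h') with h0 | h0
        · exact Or.inl h0
        · exact Or.inr (List.mem_append.mpr (Or.inl h0))
    · exact fun p hp => List.mem_append.mpr (Or.inl (hst.qsup p hp))
    · have := pvFc_set hst.shape haw hbh hfalse
      have := hst.meas
      simp only [List.length_append, List.length_cons, List.length_nil]
      omega
    · intro a' b' ha' hb' hc'
      have : a' = a ∧ b' = b := by constructor <;> omega
      obtain ⟨h1, h2⟩ := this; subst h1; subst h2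
      exact pvGetVN_set_self hst.shape haw hbh
  · rw [if_neg hg]
    refine ⟨hst, fun a b h => h, ?_⟩
    intro a b hae hbe hcell
    have haw : a < w := pvCell_lt_w hcell
    have hbh : b < g.length := pvCell_lt_h hcell
    have hemp : pvIsEmpty g ((y:Int) + d.2) ((x:Int) + d.1) = true := by
      rw [← hae, ← hbe, pvIsEmpty_eq (w := w) (by omega) (by exact_mod_cast haw) (by omega)]
      simpa using hcell
    by_cases hv : pvGetVN st.1 a b = true
    · exact hv
    · exfalso
      apply hg
      refine ⟨⟨by omega, by omega⟩, ⟨by omega, by omega⟩, hemp, ?_⟩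
      rw [← hae, ← hbe, pvGetV_eq (by omega) (by omega)]
      simp only [Int.toNat_natCast]
      simpa using hv

-- post-state of the BFS loop: marks grow, stay sound, and are closed
theorem pvBfs_post (g : List (List (Option Int))) (w h : Nat) (hh : h = g.length) :
    ∀ (fuel : Nat) (v : List (List Bool)) (q : List (Int × Int)),
      PvInv g w h v q → 4 * pvFc v + q.length ≤ fuel →
      (∀ x y, pvGetVN v x y = true → pvGetVN (pvBfsLoop g h w fuel v q) x y = true) ∧
      (∀ x y, pvGetVN (pvBfsLoop g h w fuel v q) x y = true → PvReach g w x y) ∧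
      (∀ x y, pvGetVN (pvBfsLoop g h w fuel v q) x y = true →
        pvClosedAt g w (pvBfsLoop g h w fuel v q) x y) := by
  intro fuel
  induction fuel with
  | zero =>
    intro v q hinv hfuel
    have hq : q = [] := by
      cases q with
      | nil => rfl
      | cons p rest => simp at hfuel
    subst hq
    simp only [pvBfsLoop]
    refine ⟨fun x y h => h, hinv.sound, ?_⟩
    intro x y h
    rcases hinv.closed x y h with hm | hcl
    · simp at hm
    · exact hcl
  | succ fuel ih =>
    intro v q hinv hfuel
    cases q with
    | nil =>
      simp only [pvBfsLoop]
      refine ⟨fun x y h => h, hinv.sound, ?_⟩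
      intro x y h
      rcases hinv.closed x y h with hm | hcl
      · simp at hm
      · exact hcl
    | cons p rest =>
      obtain ⟨x, y, hpe, hcell, hmark⟩ := hinv.qmem p (List.mem_cons_self)
      subst hpe
      have hreach : PvReach g w x y := hinv.sound x y hmark
      have hst0 : PvStepInv g w h v rest (4 * pvFc v + rest.length) (v, rest) :=
        ⟨hinv.shape, fun a b hv => hv,
         fun p hp => hinv.qmem p (List.mem_cons_of_mem _ hp),
         hinv.sound, fun a b hv => Or.inl hv, fun p hp => hp, le_refl _⟩
      obtain ⟨hst1, hm1, hcm1⟩ := pvBfsStep_inv hh x y (1,0) (by simp [pvDxy]) hreach _ hst0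
      obtain ⟨hst2, hm2, hcm2⟩ := pvBfsStep_inv hh x y (-1,0) (by simp [pvDxy]) hreach _ hst1
      obtain ⟨hst3, hm3, hcm3⟩ := pvBfsStep_inv hh x y (0,1) (by simp [pvDxy]) hreach _ hst2
      set st1 := pvBfsStep g h w x y (v, rest) (1,0) with hs1
      set st2 := pvBfsStep g h w x y st1 (-1,0) with hs2
      set st3 := pvBfsStep g h w x y st2 (0,1) with hs3
      have hm13 : ∀ a b, pvGetVN st1.1 a b = true → pvGetVN st3.1 a b = true :=
        fun a b hv => hm3 a b (hm2 a b hv)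
      have hcm1' := pvCM_mono hm13 hcm1
      have hcm2' := pvCM_mono hm3 hcm2
      have hclosedxy : pvClosedAt g w st3.1 x y := pvClosedAt_of_CM hcm1' hcm2' hcm3
      have hfold : pvDxy.foldl (pvBfsStep g h w x y) (v, rest) = st3 := by
        simp only [pvDxy, List.foldl_cons, List.foldl_nil, hs1, hs2, hs3]
      have hloop : pvBfsLoop g h w (fuel+1) v (((x:Int),(y:Int)) :: rest)
          = pvBfsLoop g h w fuel st3.1 st3.2 := by
        simp only [pvBfsLoop, hfold]
      have hinv3 : PvInv g w h st3.1 st3.2 := by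
        refine ⟨hst3.shape, hst3.qmem, hst3.sound, ?_⟩
        intro a b hv
        rcases hst3.fresh a b hv with h0 | h0
        · rcases hinv.closed a b h0 with hm | hcl
          · rcases List.mem_cons.mp hm with he | hm
            · have : a = x ∧ b = y := by
                constructor <;> (
                  have := congrArg Prod.fst he
                  have := congrArg Prod.snd he
                  simp_all)
              obtain ⟨h1, h2⟩ := this; subst h1; subst h2
              exact Or.inr hclosedxy
            · exact Or.inl (hst3.qsup _ hm)
          · exact Or.inr (pvClosedAt_mono (fun a' b' hv' => hm3 a' b' (hm2 a' b' (hm1 a' b' (hst0.mono a' b' hv')))) hcl)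
        · exact Or.inl h0
      have hmeas3 : 4 * pvFc st3.1 + st3.2.length ≤ fuel := by
        have := hst3.meas
        simp only [List.length_cons] at hfuel
        omega
      obtain ⟨ihmono, ihsound, ihclosed⟩ := ih st3.1 st3.2 hinv3 hmeas3
      rw [hloop]
      exact ⟨fun a b hv => ihmono a b (hm3 a b (hm2 a b (hm1 a b hv))), ihsound, ihclosed⟩

-- ---- B side: horizontal closure within a row ----

inductive PvHC (em s : Nat → Prop) : Nat → Prop
  | base (x : Nat) : s x → PvHC em s x
  | right (x : Nat) : PvHC em s x → em (x+1) → PvHC em s (x+1)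
  | left (x : Nat) : PvHC em s (x+1) → em x → PvHC em s x

-- row decomposition of reachability (no upward move)
lemma pvReach_iff_HC (g : List (List (Option Int))) (w : Nat) (y x : Nat) :
    PvReach g w x y ↔
      PvHC (fun x' => pvCell g w x' y = true)
           (fun x' => pvCell g w x' y = true ∧ (y = 0 ∨ PvReach g w x' (y-1))) x := by
  constructor
  · intro h
    induction h with
    | seed x hc => exact PvHC.base x ⟨hc, Or.inl rfl⟩
    | down x y hr hc _ =>
      exact PvHC.base x ⟨hc, Or.inr (by simpa using hr)⟩
    | right x y _ hc ih => exact PvHC.right x ih hc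
    | left x y _ hc ih => exact PvHC.left x ih hc
  · intro h
    induction h with
    | base x hs =>
      rcases hs with ⟨hc, h0 | hr⟩
      · subst h0; exact PvReach.seed x hc
      · cases y with
        | zero => exact PvReach.seed x hc
        | succ n => exact PvReach.down x n (by simpa using hr) hc
    | right x _ hc ih => exact PvReach.right x y ih hc
    | left x _ hc ih => exact PvReach.left x y ih hc

-- the visited matrix A's BFS ends with (same lets as in nb_trous_cube)
def pvVusF (grille : List (List (Option Int))) : List (List Bool) :=
  let nbLignes : Int := grille.length
  let nbColonnes : Int := (grille.headD []).length
  let grilleVus : List (List Bool) :=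
    List.replicate grille.length (List.replicate (grille.headD []).length false)
  let init : List (List Bool) × List (Int × Int) :=
    (PySem.List.pyRange 0 nbColonnes 1).foldl
      (fun st x =>
        if PySem.List.pyGet? (grille.headD []) x = some none then
          (pvSetV st.1 0 x, st.2 ++ [(x, (0 : Int))])
        else st)
      (grilleVus, [])
  pvBfsLoop grille nbLignes nbColonnes
    (4 * grille.length * (grille.headD []).length + (grille.headD []).length + 1)
    init.1 init.2

lemma pvCount_congr (g : List (List (Option Int))) (w h : Nat) (bA bB : Nat → Nat → Bool)
    (hbb : ∀ x y, x < w → y < h → bA x y = bB x y) :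
    pvCount g w h bA = pvCount g w h bB := by
  unfold pvCount
  congr 1
  apply List.map_congr_left
  intro y hy
  unfold pvCnt
  congr 1
  apply List.map_congr_left
  intro x hx
  rw [hbb x y (List.mem_range.mp hx) (List.mem_range.mp hy)]

-- fold of a 0/1 counter over an Int range as a sum over a Nat range
lemma pvFoldl_cnt (C : Int → Prop) [DecidablePred C] (n : Nat) (a : Int) :
    (PySem.List.pyRange 0 (n:Int) 1).foldl (fun acc x => if C x then acc + 1 else acc) a
      = a + ((List.range n).map (fun (k : Nat) => if C (k:Int) then (1:Int) else 0)).sum := by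
  induction n with
  | zero => rw [PySem.List.pyRange_one_eq_nil (by omega)]; simp
  | succ n ih =>
    rw [show ((n+1:Nat):Int) = (n:Int) + 1 by push_cast; ring,
      PySem.List.pyRange_one_succ_right (by omega), List.foldl_append, ih, List.range_succ]
    simp only [List.foldl_cons, List.foldl_nil, List.map_append, List.map_cons,
      List.map_nil, List.sum_append, List.sum_cons, List.sum_nil]
    split <;> omega

-- fold whose body adds a per-index quantity
lemma pvFoldl_addf (S : Int → Int) (body : Int → Int → Int)
    (hbody : ∀ acc x, body acc x = acc + S x) (n : Nat) (a : Int) :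
    (PySem.List.pyRange 0 (n:Int) 1).foldl body a
      = a + ((List.range n).map (fun (k : Nat) => S (k:Int))).sum := by
  induction n with
  | zero => rw [PySem.List.pyRange_one_eq_nil (by omega)]; simp
  | succ n ih =>
    rw [show ((n+1:Nat):Int) = (n:Int) + 1 by push_cast; ring,
      PySem.List.pyRange_one_succ_right (by omega), List.foldl_append, ih, List.range_succ]
    simp only [List.foldl_cons, List.foldl_nil, List.map_append, List.map_cons,
      List.map_nil, List.sum_append, List.sum_cons, List.sum_nil]
    rw [hbody]
    omega

theorem nb_trous_cube_A_eq (g : List (List (Option Int))) :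
    nb_trous_cube g = pvCount g (g.headD []).length g.length
      (fun x y => pvGetVN (pvVusF g) x y) := by
  show (PySem.List.pyRange 0 (g.length:Int) 1).foldl
      (fun acc y => (PySem.List.pyRange 0 ((g.headD []).length:Int) 1).foldl
        (fun acc x =>
          if pvGetV (pvVusF g) y x = false ∧ pvIsEmpty g y x = true then acc + 1 else acc)
        acc) 0 = _
  rw [pvFoldl_addf (fun y => ((List.range (g.headD []).length).map
        (fun (k : Nat) => if pvGetV (pvVusF g) y (k:Int) = false ∧ pvIsEmpty g y (k:Int) = true
          then (1:Int) else 0)).sum)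
      _ (fun acc y => pvFoldl_cnt
        (fun x => pvGetV (pvVusF g) y x = false ∧ pvIsEmpty g y x = true) _ acc)]
  unfold pvCount
  rw [zero_add]
  congr 1
  apply List.map_congr_left
  intro y hy
  unfold pvCnt
  congr 1
  apply List.map_congr_left
  intro x hx
  have hxw := List.mem_range.mp hx
  rw [pvGetV_eq (by omega) (by omega),
    pvIsEmpty_eq (w := (g.headD []).length) (by omega) (by exact_mod_cast hxw) (by omega)]
  simp only [Int.toNat_natCast]
  exact if_congr (Iff.intro (fun h => ⟨h.2, h.1⟩) (fun h => ⟨h.2, h.1⟩)) rfl rfl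

lemma pvGetVN_rep {w h a b : Nat} :
    pvGetVN (List.replicate h (List.replicate w false)) a b = false := by
  unfold pvGetVN
  simp only [List.getElem?_replicate]
  split_ifs with h1
  · simp [List.getElem?_replicate]
    split_ifs <;> simp
  · simp

lemma pvShape_rep {w h : Nat} : pvShape (List.replicate h (List.replicate w false)) w h := by
  constructor
  · simp
  · intro r hr
    rw [List.eq_of_mem_replicate hr]
    simp

lemma pvFc_rep {w h : Nat} : pvFc (List.replicate h (List.replicate w false)) = h * w := by
  unfold pvFc
  rw [List.map_replicate, List.sum_replicate]
  simp [smul_eq_mul]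

lemma pvCell0 {g : List (List (Option Int))} (hne : g ≠ []) {k : Nat}
    (hk : k < (g.headD []).length) :
    pvCell g (g.headD []).length k 0 = true ↔ (g.headD [])[k]? = some none := by
  cases g with
  | nil => exact absurd rfl hne
  | cons r tl =>
    unfold pvCell
    simp only [List.headD_cons] at hk ⊢
    rw [List.getElem?_cons_zero]
    cases hc : r[k] <;> simp [hc, hk]

-- state after the seeding loop over the first n columns
structure PvSeedInv (g : List (List (Option Int))) (w h n : Nat)
    (st : List (List Bool) × List (Int × Int)) : Prop where
  shape : pvShape st.1 w h
  markiff : ∀ a b : Nat, pvGetVN st.1 a b = true ↔ (b = 0 ∧ a < n ∧ pvCell g w a 0 = true)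
  qmem : ∀ p ∈ st.2, ∃ a : Nat, p = ((a:Int), (0:Int)) ∧ pvCell g w a 0 = true
  qcover : ∀ a b : Nat, pvGetVN st.1 a b = true → ((a:Int), (b:Int)) ∈ st.2
  qlen : st.2.length ≤ n
  fcle : pvFc st.1 ≤ h * w

lemma pvSeed_inv (g : List (List (Option Int))) (hne : g ≠ [])
    (hPre : ∀ r ∈ g, (g.headD []).length ≤ r.length) :
    ∀ n, n ≤ (g.headD []).length →
      PvSeedInv g (g.headD []).length g.length n
        ((PySem.List.pyRange 0 (n:Int) 1).foldl
          (fun st x =>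
            if PySem.List.pyGet? (g.headD []) x = some none then
              (pvSetV st.1 0 x, st.2 ++ [(x, (0 : Int))])
            else st)
          (List.replicate g.length (List.replicate (g.headD []).length false), [])) := by
  intro n
  induction n with
  | zero =>
    intro _
    rw [PySem.List.pyRange_one_eq_nil (by omega)]
    simp only [List.foldl_nil]
    refine ⟨pvShape_rep, ?_, ?_, ?_, ?_, ?_⟩
    · intro a b; simp [pvGetVN_rep]
    · intro p hp; simp at hp
    · intro a b h; rw [pvGetVN_rep] at h; cases h
    · simp
    · rw [pvFc_rep]
  | succ n ih =>
    intro hn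
    have hst := ih (by omega)
    rw [show ((n+1:Nat):Int) = (n:Int) + 1 by push_cast; ring,
      PySem.List.pyRange_one_succ_right (by omega), List.foldl_append]
    simp only [List.foldl_cons, List.foldl_nil]
    set st := ((PySem.List.pyRange 0 (n:Int) 1).foldl
          (fun st x =>
            if PySem.List.pyGet? (g.headD []) x = some none then
              (pvSetV st.1 0 x, st.2 ++ [(x, (0 : Int))])
            else st)
          (List.replicate g.length (List.replicate (g.headD []).length false), [])) with hstdef
    by_cases hg : PySem.List.pyGet? (g.headD []) (n:Int) = some none
    · rw [if_pos hg]
      have hcell : pvCell g (g.headD []).length n 0 = true := by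
        rw [pvCell0 hne (by omega)]
        rwa [PySem.List.pyGet?_natCast] at hg
      have hset : pvSetV st.1 0 (n:Int) = pvSetVN st.1 n 0 := by
        rw [pvSetV_eq]; simp
      rw [hset]
      have hh0 : 0 < g.length := by
        cases g with
        | nil => exact absurd rfl hne
        | cons r tl => simp
      refine ⟨pvShape_set hst.shape hh0, ?_, ?_, ?_, ?_, ?_⟩
      · intro a b
        by_cases he : a = n ∧ b = 0
        · obtain ⟨h1, h2⟩ := he
          rw [h1, h2, pvGetVN_set_self hst.shape (show n < (g.headD []).length by omega) hh0]
          exact ⟨fun _ => ⟨rfl, by omega, hcell⟩, fun _ => rfl⟩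
        · rw [pvGetVN_set_other he, hst.markiff a b]
          constructor
          · rintro ⟨h1, h2, h3⟩; exact ⟨h1, by omega, h3⟩
          · rintro ⟨h1, h2, h3⟩
            refine ⟨h1, ?_, h3⟩
            rcases Nat.lt_succ_iff_lt_or_eq.mp h2 with h | h
            · exact h
            · exact absurd ⟨h, h1⟩ he
      · intro p hp
        rcases List.mem_append.mp hp with hp | hp
        · exact hst.qmem p hp
        · simp at hp
          exact ⟨n, by simp [hp], hcell⟩
      · intro a b h
        by_cases he : a = n ∧ b = 0
        · obtain ⟨h1, h2⟩ := he; subst h1; subst h2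
          exact List.mem_append.mpr (Or.inr (by simp))
        · rw [pvGetVN_set_other he] at h
          exact List.mem_append.mpr (Or.inl (hst.qcover a b h))
      · simp only [List.length_append, List.length_cons, List.length_nil]
        have := hst.qlen
        omega
      · dsimp only
        have h1 : pvGetVN st.1 n 0 = false := by
          rcases hv : pvGetVN st.1 n 0 with _ | _
          · rfl
          · have := (hst.markiff n 0).mp hv
            omega
        have := pvFc_set hst.shape (show n < (g.headD []).length by omega) hh0 h1
        have := hst.fcle
        omega
    · rw [if_neg hg]
      have hcell : ¬ pvCell g (g.headD []).length n 0 = true := by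
        rw [pvCell0 hne (by omega)]
        rwa [PySem.List.pyGet?_natCast] at hg
      refine ⟨hst.shape, ?_, hst.qmem, hst.qcover, by have := hst.qlen; omega, hst.fcle⟩
      intro a b
      rw [hst.markiff a b]
      constructor
      · rintro ⟨h1, h2, h3⟩; exact ⟨h1, by omega, h3⟩
      · rintro ⟨h1, h2, h3⟩
        refine ⟨h1, ?_, h3⟩
        rcases Nat.lt_succ_iff_lt_or_eq.mp h2 with h | h
        · exact h
        · subst h; exact absurd h3 hcell

theorem pvVusF_correct (g : List (List (Option Int)))
    (hne : g ≠ []) (hPre : ∀ r ∈ g, (g.headD []).length ≤ r.length) :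
    ∀ x y, pvGetVN (pvVusF g) x y = true ↔ PvReach g (g.headD []).length x y := by
  have hseed := pvSeed_inv g hne hPre (g.headD []).length (le_refl _)
  set w := (g.headD []).length with hw
  set h := g.length with hh
  set st := ((PySem.List.pyRange 0 (w:Int) 1).foldl
          (fun st x =>
            if PySem.List.pyGet? (g.headD []) x = some none then
              (pvSetV st.1 0 x, st.2 ++ [(x, (0 : Int))])
            else st)
          (List.replicate g.length (List.replicate (g.headD []).length false), [])) with hstdef
  have hVus : pvVusF g = pvBfsLoop g (h:Int) (w:Int) (4 * h * w + w + 1) st.1 st.2 := rfl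
  have hinv : PvInv g w h st.1 st.2 := by
    refine ⟨hseed.shape, ?_, ?_, ?_⟩
    · intro p hp
      obtain ⟨a, hpe, hcell⟩ := hseed.qmem p hp
      refine ⟨a, 0, hpe, hcell, ?_⟩
      rw [hseed.markiff]
      exact ⟨rfl, pvCell_lt_w hcell, hcell⟩
    · intro a b hv
      obtain ⟨h1, _, h3⟩ := (hseed.markiff a b).mp hv
      subst h1
      exact PvReach.seed a h3
    · intro a b hv
      exact Or.inl (hseed.qcover a b hv)
  have hmeas : 4 * pvFc st.1 + st.2.length ≤ 4 * h * w + w + 1 := by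
    have h1 := hseed.fcle
    have h2 := hseed.qlen
    have h3 : 4 * h * w = 4 * (h * w) := by ring
    omega
  obtain ⟨hmono, hsound, hclosed⟩ := pvBfs_post g w h hh (4 * h * w + w + 1) st.1 st.2 hinv hmeas
  rw [hVus]
  intro x y
  constructor
  · exact hsound x y
  · intro hr
    induction hr with
    | seed a hc =>
      apply hmono
      rw [hseed.markiff]
      exact ⟨rfl, pvCell_lt_w hc, hc⟩
    | down a b _ hc ihh => exact (hclosed a b ihh).2.2 hc
    | right a b _ hc ihh => exact (hclosed a b ihh).1 hc
    | left a b _ hc ihh => exact (hclosed (a+1) b ihh).2.1 a rfl hc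

-- ---- B side: scan lemmas ----

def pvAt (u : List Bool) (i : Nat) : Bool := u[i]?.getD false

lemma pvScan_length (l : List (Option Int × Bool)) (prev : Bool) :
    (pvScan l prev).length = l.length := by
  induction l generalizing prev with
  | nil => rfl
  | cons p rest ih =>
    obtain ⟨c, r⟩ := p
    simp [pvScan, ih]

lemma pvScan_zero (c : Option Int) (r : Bool) (rest : List (Option Int × Bool)) (prev : Bool) :
    pvAt (pvScan ((c,r) :: rest) prev) 0 = (r || (decide (c = none) && prev)) := rfl

lemma pvScan_succ (c : Option Int) (r : Bool) (rest : List (Option Int × Bool)) (prev : Bool) (k : Nat) :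
    pvAt (pvScan ((c,r) :: rest) prev) (k+1)
      = pvAt (pvScan rest (r || (decide (c = none) && prev))) k := rfl

lemma pvScan_carry (l : List (Option Int × Bool)) :
    ∀ i, i < l.length → (∀ k, k ≤ i → l[k]?.map Prod.fst = some none) →
      pvAt (pvScan l true) i = true := by
  induction l with
  | nil => intro i hi _; simp at hi
  | cons p rest ih =>
    obtain ⟨c, r⟩ := p
    intro i hi hpath
    have hc : c = none := by
      have := hpath 0 (by omega)
      simpa using this
    subst hc
    cases i with
    | zero => simp [pvScan_zero]
    | succ m =>
      rw [pvScan_succ]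
      have hcur : (r || (decide ((none : Option Int) = none) && true)) = true := by simp
      rw [hcur]
      exact ih m (by simpa using hi) (fun k hk => by
        have := hpath (k+1) (by omega)
        simpa using this)

lemma pvScan_fill (l : List (Option Int × Bool)) (prev : Bool) :
    ∀ j i, j ≤ i → i < l.length →
      (l[j]?.map Prod.snd = some true) →
      (∀ k, j < k → k ≤ i → l[k]?.map Prod.fst = some none) →
      pvAt (pvScan l prev) i = true := by
  induction l generalizing prev with
  | nil => intro j i _ hi _ _; simp at hi
  | cons p rest ih =>
    obtain ⟨c, r⟩ := p
    intro j i hji hi hs hpath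
    cases i with
    | zero =>
      have hj : j = 0 := by omega
      subst hj
      have hr : r = true := by simpa using hs
      subst hr
      simp [pvScan_zero]
    | succ m =>
      rw [pvScan_succ]
      cases j with
      | zero =>
        have hr : r = true := by simpa using hs
        subst hr
        rw [Bool.true_or]
        exact pvScan_carry rest m (by simpa using hi) (fun k hk => by
          have := hpath (k+1) (by omega) (by omega)
          simpa using this)
      | succ j' =>
        exact ih _ j' m (by omega) (by simpa using hi) (by simpa using hs)
          (fun k h1 h2 => by
            have := hpath (k+1) (by omega) (by omega)
            simpa using this)

lemma pvScan_sound (l : List (Option Int × Bool)) (prev : Bool) :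
    ∀ i, i < l.length → pvAt (pvScan l prev) i = true →
      (∃ j, j ≤ i ∧ l[j]?.map Prod.snd = some true ∧
        (∀ k, j < k → k ≤ i → l[k]?.map Prod.fst = some none))
      ∨ (prev = true ∧ ∀ k, k ≤ i → l[k]?.map Prod.fst = some none) := by
  induction l generalizing prev with
  | nil => intro i hi _; simp at hi
  | cons p rest ih =>
    obtain ⟨c, r⟩ := p
    intro i hi ht
    cases i with
    | zero =>
      rw [pvScan_zero] at ht
      rcases Bool.or_eq_true_iff.mp ht with hr | hcp
      · exact Or.inl ⟨0, le_refl 0, by simp [hr], fun k h1 h2 => by omega⟩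
      · have hc : c = none := by
          rcases (Bool.and_eq_true _ _).mp hcp with ⟨h1, _⟩
          simpa using h1
        have hprev : prev = true := ((Bool.and_eq_true _ _).mp hcp).2
        refine Or.inr ⟨hprev, fun k hk => ?_⟩
        have hk0 : k = 0 := by omega
        subst hk0
        simp [hc]
    | succ m =>
      rw [pvScan_succ] at ht
      rcases ih _ m (by simpa using hi) ht with ⟨j, hj, hs, hpath⟩ | ⟨hcur, hpath⟩
      · refine Or.inl ⟨j+1, by omega, by simpa using hs, fun k h1 h2 => ?_⟩
        obtain ⟨k', rfl⟩ : ∃ k', k = k' + 1 := ⟨k - 1, by omega⟩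
        have := hpath k' (by omega) (by omega)
        simpa using this
      · rcases Bool.or_eq_true_iff.mp hcur with hr | hcp
        · refine Or.inl ⟨0, by omega, by simp [hr], fun k h1 h2 => ?_⟩
          obtain ⟨k', rfl⟩ : ∃ k', k = k' + 1 := ⟨k - 1, by omega⟩
          have := hpath k' (by omega)
          simpa using this
        · have hc : c = none := by
            rcases (Bool.and_eq_true _ _).mp hcp with ⟨h1, _⟩
            simpa using h1
          have hprev : prev = true := ((Bool.and_eq_true _ _).mp hcp).2
          refine Or.inr ⟨hprev, fun k hk => ?_⟩
          cases k with
          | zero => simp [hc]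
          | succ k' =>
            have := hpath k' (by omega)
            simpa using this

-- ---- B side: horizontal-closure chains and the per-row expansion ----

def pvExpand (row : List (Option Int)) (s : List Bool) : List Bool :=
  (pvScan (row.reverse.zip (pvScan (row.zip s) false).reverse) false).reverse

lemma pvAt_iff_some {u : List Bool} {i : Nat} (hi : i < u.length) :
    pvAt u i = true ↔ u[i]? = some true := by
  unfold pvAt
  rw [List.getElem?_eq_getElem hi]
  simp

lemma pvHC_right_chain (em s : Nat → Prop) (x0 : Nat) (hs : s x0) :
    ∀ d, (∀ k, x0 < k → k ≤ x0 + d → em k) → PvHC em s (x0 + d) := by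
  intro d
  induction d with
  | zero => intro _; exact PvHC.base x0 hs
  | succ d ih =>
    intro hpath
    exact PvHC.right (x0 + d) (ih (fun k h1 h2 => hpath k h1 (by omega)))
      (hpath (x0 + d + 1) (by omega) (by omega))

lemma pvHC_left_chain (em s : Nat → Prop) :
    ∀ d x, PvHC em s (x + d) → (∀ k, x ≤ k → k < x + d → em k) → PvHC em s x := by
  intro d
  induction d with
  | zero => intro x h _; exact h
  | succ d ih =>
    intro x h hpath
    have h' : PvHC em s ((x+1) + d) := by
      have : x + (d+1) = (x+1) + d := by omega
      rwa [this] at h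
    have hx1 : PvHC em s (x+1) := ih (x+1) h' (fun k h1 h2 => hpath k (by omega) (by omega))
    exact PvHC.left x hx1 (hpath x (by omega) (by omega))

lemma pvHC_interval (em s : Nat → Prop) (hse : ∀ k, s k → em k) :
    ∀ x, PvHC em s x → ∃ x0, s x0 ∧ ∀ k, min x0 x ≤ k → k ≤ max x0 x → em k := by
  intro x h
  induction h with
  | base x hs =>
    refine ⟨x, hs, fun k h1 h2 => ?_⟩
    have : k = x := by omega
    subst this
    exact hse _ hs
  | right x _ he ih =>
    obtain ⟨x0, hs0, hpath⟩ := ih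
    refine ⟨x0, hs0, fun k h1 h2 => ?_⟩
    by_cases hk : k = x + 1
    · subst hk; exact he
    · exact hpath k (by omega) (by omega)
  | left x _ he ih =>
    obtain ⟨x0, hs0, hpath⟩ := ih
    refine ⟨x0, hs0, fun k h1 h2 => ?_⟩
    by_cases hk : k = x
    · subst hk; exact he
    · exact hpath k (by omega) (by omega)

lemma pvExpand_length (row : List (Option Int)) (s : List Bool) (hl : s.length = row.length) :
    (pvExpand row s).length = row.length := by
  unfold pvExpand
  rw [List.length_reverse, pvScan_length, List.length_zip, List.length_reverse,
    List.length_reverse, pvScan_length, List.length_zip, hl]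
  omega

lemma pvExpand_iff (row : List (Option Int)) (s : List Bool) (n : Nat)
    (hrow : row.length = n) (hsl : s.length = n)
    (hse : ∀ j : Nat, s[j]? = some true → row[j]? = some none) :
    ∀ i, i < n →
      (pvAt (pvExpand row s) i = true ↔
        PvHC (fun k => k < n ∧ row[k]? = some none)
             (fun k => k < n ∧ s[k]? = some true) i) := by
  intro i hi
  have hzl : (row.zip s).length = n := by rw [List.length_zip]; omega
  have htl : (pvScan (row.zip s) false).length = n := by rw [pvScan_length]; omega
  have hrl : (row.reverse.zip (pvScan (row.zip s) false).reverse).length = n := by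
    rw [List.length_zip, List.length_reverse, List.length_reverse]; omega
  have hul : (pvScan (row.reverse.zip (pvScan (row.zip s) false).reverse) false).length = n := by
    rw [pvScan_length]; omega
  -- access bridges
  have hzfst : ∀ k, k < n → ((row.zip s)[k]?.map Prod.fst) = row[k]? := by
    intro k hk
    rw [List.getElem?_eq_getElem (show k < (row.zip s).length by omega), List.getElem_zip,
      List.getElem?_eq_getElem (show k < row.length by omega)]
    rfl
  have hzsnd : ∀ k, k < n → ((row.zip s)[k]?.map Prod.snd) = s[k]? := by
    intro k hk
    rw [List.getElem?_eq_getElem (show k < (row.zip s).length by omega), List.getElem_zip,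
      List.getElem?_eq_getElem (show k < s.length by omega)]
    rfl
  have hrfst : ∀ k, k < n →
      ((row.reverse.zip (pvScan (row.zip s) false).reverse)[k]?.map Prod.fst) = row[n-1-k]? := by
    intro k hk
    rw [List.getElem?_eq_getElem (show k < (row.reverse.zip (pvScan (row.zip s) false).reverse).length by omega),
      List.getElem_zip]
    have : row.reverse[k]? = row[n-1-k]? := by
      rw [List.getElem?_reverse (by omega), hrow]
    rw [← this, List.getElem?_eq_getElem (show k < row.reverse.length by rw [List.length_reverse]; omega)]
    rfl
  have hrsnd : ∀ k, k < n →
      ((row.reverse.zip (pvScan (row.zip s) false).reverse)[k]?.map Prod.snd)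
        = (pvScan (row.zip s) false)[n-1-k]? := by
    intro k hk
    rw [List.getElem?_eq_getElem (show k < (row.reverse.zip (pvScan (row.zip s) false).reverse).length by omega),
      List.getElem_zip]
    have : (pvScan (row.zip s) false).reverse[k]? = (pvScan (row.zip s) false)[n-1-k]? := by
      rw [List.getElem?_reverse (by omega), htl]
    rw [← this, List.getElem?_eq_getElem (show k < (pvScan (row.zip s) false).reverse.length by rw [List.length_reverse]; omega)]
    rfl
  have hufl : pvAt (pvExpand row s) i
      = pvAt (pvScan (row.reverse.zip (pvScan (row.zip s) false).reverse) false) (n-1-i) := by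
    unfold pvExpand pvAt
    rw [List.getElem?_reverse (by omega), hul]
  rw [hufl]
  constructor
  · -- sound: the reverse scan hits i ⇒ horizontally closed reach
    intro hu
    rcases pvScan_sound _ false (n-1-i) (by omega) hu with ⟨j, hj, hsnd, hpath⟩ | ⟨hf, _⟩
    · rw [hrsnd j (by omega)] at hsnd
      have hemp1 : ∀ m, i ≤ m → m < n-1-j → row[m]? = some none := by
        intro m h1 h2
        have := hpath (n-1-m) (by omega) (by omega)
        rw [hrfst (n-1-m) (by omega)] at this
        have hmm : n-1-(n-1-m) = m := by omega
        rwa [hmm] at this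
      have ht1 : pvAt (pvScan (row.zip s) false) (n-1-j) = true := by
        rw [pvAt_iff_some (by omega)]
        exact hsnd
      rcases pvScan_sound _ false (n-1-j) (by omega) ht1 with ⟨j0, hj0, hsnd0, hpath0⟩ | ⟨hf, _⟩
      · rw [hzsnd j0 (by omega)] at hsnd0
        have hemp0 : ∀ k, j0 < k → k ≤ n-1-j → row[k]? = some none := by
          intro k h1 h2
          have := hpath0 k h1 h2
          rwa [hzfst k (by omega)] at this
        by_cases hcase : j0 ≤ i
        · have := pvHC_right_chain (fun k => k < n ∧ row[k]? = some none)
            (fun k => k < n ∧ s[k]? = some true) j0 ⟨by omega, hsnd0⟩ (i - j0)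
            (fun k h1 h2 => ⟨by omega, hemp0 k h1 (by omega)⟩)
          have he : j0 + (i - j0) = i := by omega
          rwa [he] at this
        · refine pvHC_left_chain (fun k => k < n ∧ row[k]? = some none)
            (fun k => k < n ∧ s[k]? = some true) (j0 - i) i ?_ ?_
          · have he : i + (j0 - i) = j0 := by omega
            rw [he]
            exact PvHC.base j0 ⟨by omega, hsnd0⟩
          · intro k h1 h2
            exact ⟨by omega, hemp1 k (by omega) (by omega)⟩
      · cases hf
    · cases hf
  · -- complete: reachability ⇒ the reverse scan hits i
    intro hc
    obtain ⟨x0, ⟨hx0n, hs0⟩, hpath⟩ := pvHC_interval _ _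
      (fun k hk => ⟨hk.1, hse k hk.2⟩) i hc
    have hfill : ∀ x1, i ≤ x1 → x1 < n → pvAt (pvScan (row.zip s) false) x1 = true →
        (∀ m, i ≤ m → m < x1 → row[m]? = some none) →
        pvAt (pvScan (row.reverse.zip (pvScan (row.zip s) false).reverse) false) (n-1-i) = true := by
      intro x1 h1 h2 ht hemp
      apply pvScan_fill _ false (n-1-x1) (n-1-i) (by omega) (by omega)
      · rw [hrsnd (n-1-x1) (by omega)]
        have hmm : n-1-(n-1-x1) = x1 := by omega
        rw [hmm]
        rwa [pvAt_iff_some (by omega)] at ht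
      · intro k hk1 hk2
        rw [hrfst k (by omega)]
        exact hemp (n-1-k) (by omega) (by omega)
    by_cases hcase : x0 ≤ i
    · have ht : pvAt (pvScan (row.zip s) false) i = true := by
        apply pvScan_fill _ false x0 i hcase (by omega)
        · rw [hzsnd x0 (by omega)]
          exact hs0
        · intro k h1 h2
          rw [hzfst k (by omega)]
          exact (hpath k (by omega) (by omega)).2
      exact hfill i (by omega) (by omega) ht (fun m h1 h2 => by omega)
    · have ht : pvAt (pvScan (row.zip s) false) x0 = true := by
        apply pvScan_fill _ false x0 x0 (le_refl _) (by omega)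
        · rw [hzsnd x0 (by omega)]
          exact hs0
        · intro k h1 h2; omega
      apply hfill x0 (by omega) (by omega) ht
      intro m h1 h2
      exact (hpath m (by omega) (by omega)).2

-- ---- B side: the row sweep ----

def pvRowAt (g : List (List (Option Int))) (w y : Nat) : List (Option Int) :=
  (g.getD y []).take w

-- the reach row B's sweep holds after processing row y
def pvRR (g : List (List (Option Int))) (w : Nat) : Nat → List Bool
  | 0 => pvExpand (pvRowAt g w 0)
      (((pvRowAt g w 0).zip (List.replicate w false)).map
        (fun p => decide (p.1 = none) && (true || p.2)))
  | (y+1) => pvExpand (pvRowAt g w (y+1))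
      (((pvRowAt g w (y+1)).zip (pvRR g w y)).map
        (fun p => decide (p.1 = none) && (false || p.2)))

lemma pvRowAt_length {g : List (List (Option Int))} {w y : Nat}
    (hPre : ∀ r ∈ g, w ≤ r.length) (hy : y < g.length) :
    (pvRowAt g w y).length = w := by
  unfold pvRowAt
  rw [List.getD_eq_getElem?_getD, List.getElem?_eq_getElem hy]
  simp only [Option.getD_some, List.length_take]
  have := hPre _ (List.getElem_mem hy)
  omega

lemma pvRowAt_get {g : List (List (Option Int))} {w y x : Nat}
    (hPre : ∀ r ∈ g, w ≤ r.length) (hy : y < g.length) (hx : x < w) :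
    (pvRowAt g w y)[x]? = (g[y]'hy)[x]? := by
  unfold pvRowAt
  rw [List.getD_eq_getElem?_getD, List.getElem?_eq_getElem hy]
  simp only [Option.getD_some]
  have hlen := hPre _ (List.getElem_mem hy)
  rw [List.getElem?_eq_getElem (by rw [List.length_take]; omega),
    List.getElem?_eq_getElem (by omega : x < (g[y]'hy).length), List.getElem_take]

lemma pvCellRow {g : List (List (Option Int))} {w y x : Nat}
    (hPre : ∀ r ∈ g, w ≤ r.length) (hy : y < g.length) (hx : x < w) :
    (pvCell g w x y = true) ↔ (pvRowAt g w y)[x]? = some none := by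
  rw [pvRowAt_get hPre hy hx]
  unfold pvCell
  rw [List.getElem?_eq_getElem hy]
  simp only [decide_eq_true hx, Bool.true_and]
  have hlen := hPre _ (List.getElem_mem hy)
  rcases hc : (g[y]'hy)[x]? with _ | c
  · have := List.getElem?_eq_none_iff.mp hc
    omega
  · cases c
    · simp
    · simp

lemma pvRR_length {g : List (List (Option Int))} {w : Nat}
    (hPre : ∀ r ∈ g, w ≤ r.length) :
    ∀ y, y < g.length → (pvRR g w y).length = w := by
  intro y
  induction y with
  | zero =>
    intro hy
    unfold pvRR
    rw [pvExpand_length, pvRowAt_length hPre hy]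
    rw [List.length_map, List.length_zip, List.length_replicate, pvRowAt_length hPre hy]
    omega
  | succ n ih =>
    intro hy
    unfold pvRR
    rw [pvExpand_length, pvRowAt_length hPre hy]
    rw [List.length_map, List.length_zip, ih (by omega), pvRowAt_length hPre hy]
    omega

lemma pvSeed_get {row : List (Option Int)} {prev : List Bool} {w : Nat} {b : Bool}
    (hrow : row.length = w) (hprev : prev.length = w) {j : Nat} (hj : j < w) :
    ((row.zip prev).map (fun p => decide (p.1 = none) && (b || p.2)))[j]?
      = some (decide ((row[j]'(by omega)) = none) && (b || (prev[j]'(by omega)))) := by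
  rw [List.getElem?_eq_getElem (by rw [List.length_map, List.length_zip]; omega)]
  simp only [List.getElem_map, List.getElem_zip]

lemma pvHC_congr {em1 em2 s1 s2 : Nat → Prop}
    (hem : ∀ k, em1 k ↔ em2 k) (hs : ∀ k, s1 k ↔ s2 k) :
    ∀ x, PvHC em1 s1 x → PvHC em2 s2 x := by
  intro x h
  induction h with
  | base x hb => exact PvHC.base x ((hs x).mp hb)
  | right x _ he ih => exact PvHC.right x ih ((hem (x+1)).mp he)
  | left x _ he ih => exact PvHC.left x ih ((hem x).mp he)

lemma pvRR_iff {g : List (List (Option Int))} {w : Nat}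
    (hPre : ∀ r ∈ g, w ≤ r.length) :
    ∀ y, y < g.length → ∀ x, x < w →
      (pvAt (pvRR g w y) x = true ↔ PvReach g w x y) := by
  intro y
  induction y with
  | zero =>
    intro hy x hx
    have hrl := pvRowAt_length hPre hy
    have hsl : (((pvRowAt g w 0).zip (List.replicate w false)).map
        (fun p => decide (p.1 = none) && (true || p.2))).length = w := by
      rw [List.length_map, List.length_zip, List.length_replicate]; omega
    have hse : ∀ j : Nat, (((pvRowAt g w 0).zip (List.replicate w false)).map
        (fun p => decide (p.1 = none) && (true || p.2)))[j]? = some true →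
        (pvRowAt g w 0)[j]? = some none := by
      intro j hjs
      have hj : j < w := by
        by_contra hj
        rw [List.getElem?_eq_none (by rw [List.length_map, List.length_zip, List.length_replicate]; omega)] at hjs
        cases hjs
      rw [pvSeed_get hrl (by simp) hj] at hjs
      have := Option.some.inj hjs
      have hd : decide ((pvRowAt g w 0)[j]'(by omega) = none) = true := by
        rcases hde : decide ((pvRowAt g w 0)[j]'(by omega) = none) with _ | _
        · rw [hde] at this; simp at this
        · rfl
      rw [List.getElem?_eq_getElem (by omega)]
      simpa using hd
    rw [show pvRR g w 0 = pvExpand (pvRowAt g w 0)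
        (((pvRowAt g w 0).zip (List.replicate w false)).map
          (fun p => decide (p.1 = none) && (true || p.2))) from rfl]
    rw [pvExpand_iff _ _ w hrl hsl hse x hx, pvReach_iff_HC g w 0 x]
    constructor
    · apply pvHC_congr
      · intro k
        constructor
        · rintro ⟨hk, hke⟩; rw [pvCellRow hPre hy hk]; exact hke
        · intro hke
          have hk := pvCell_lt_w hke
          exact ⟨hk, (pvCellRow hPre hy hk).mp hke⟩
      · intro k
        constructor
        · rintro ⟨hk, hks⟩
          rw [pvSeed_get hrl (by simp) hk] at hks
          have := Option.some.inj hks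
          have hd : decide ((pvRowAt g w 0)[k]'(by omega) = none) = true := by
            rcases hde : decide ((pvRowAt g w 0)[k]'(by omega) = none) with _ | _
            · rw [hde] at this; simp at this
            · rfl
          refine ⟨(pvCellRow hPre hy hk).mpr ?_, Or.inl rfl⟩
          rw [List.getElem?_eq_getElem (by omega)]
          simpa using hd
        · rintro ⟨hke, _⟩
          have hk := pvCell_lt_w hke
          refine ⟨hk, ?_⟩
          rw [pvSeed_get hrl (by simp) hk]
          have := (pvCellRow hPre hy hk).mp hke
          rw [List.getElem?_eq_getElem (by omega)] at this
          have := Option.some.inj this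
          simp [this]
    · apply pvHC_congr
      · intro k
        constructor
        · intro hke
          have hk := pvCell_lt_w hke
          exact ⟨hk, (pvCellRow hPre hy hk).mp hke⟩
        · rintro ⟨hk, hke⟩; rw [pvCellRow hPre hy hk]; exact hke
      · intro k
        constructor
        · rintro ⟨hke, _⟩
          have hk := pvCell_lt_w hke
          refine ⟨hk, ?_⟩
          rw [pvSeed_get hrl (by simp) hk]
          have := (pvCellRow hPre hy hk).mp hke
          rw [List.getElem?_eq_getElem (by omega)] at this
          have := Option.some.inj this
          simp [this]
        · rintro ⟨hk, hks⟩
          rw [pvSeed_get hrl (by simp) hk] at hks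
          have := Option.some.inj hks
          have hd : decide ((pvRowAt g w 0)[k]'(by omega) = none) = true := by
            rcases hde : decide ((pvRowAt g w 0)[k]'(by omega) = none) with _ | _
            · rw [hde] at this; simp at this
            · rfl
          refine ⟨(pvCellRow hPre hy hk).mpr ?_, Or.inl rfl⟩
          rw [List.getElem?_eq_getElem (by omega)]
          simpa using hd
  | succ n ih =>
    intro hy x hx
    have hrl := pvRowAt_length hPre hy
    have hpl : (pvRR g w n).length = w := pvRR_length hPre n (by omega)
    have hsl : (((pvRowAt g w (n+1)).zip (pvRR g w n)).map
        (fun p => decide (p.1 = none) && (false || p.2))).length = w := by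
      rw [List.length_map, List.length_zip]; omega
    have hse : ∀ j : Nat, (((pvRowAt g w (n+1)).zip (pvRR g w n)).map
        (fun p => decide (p.1 = none) && (false || p.2)))[j]? = some true →
        (pvRowAt g w (n+1))[j]? = some none := by
      intro j hjs
      have hj : j < w := by
        by_contra hj
        rw [List.getElem?_eq_none (by rw [hsl]; omega)] at hjs
        cases hjs
      rw [pvSeed_get hrl hpl hj] at hjs
      have := Option.some.inj hjs
      have hd : decide ((pvRowAt g w (n+1))[j]'(by omega) = none) = true := by
        rcases hde : decide ((pvRowAt g w (n+1))[j]'(by omega) = none) with _ | _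
        · rw [hde] at this; simp at this
        · rfl
      rw [List.getElem?_eq_getElem (by omega)]
      simpa using hd
    have hscell : ∀ k : Nat, (k < w ∧ (((pvRowAt g w (n+1)).zip (pvRR g w n)).map
          (fun p => decide (p.1 = none) && (false || p.2)))[k]? = some true)
        ↔ (pvCell g w k (n+1) = true ∧ ((n+1) = 0 ∨ PvReach g w k ((n+1)-1))) := by
      intro k
      constructor
      · rintro ⟨hk, hks⟩
        rw [pvSeed_get hrl hpl hk] at hks
        have heq := Option.some.inj hks
        have hd : decide ((pvRowAt g w (n+1))[k]'(by omega) = none) = true := by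
          rcases hde : decide ((pvRowAt g w (n+1))[k]'(by omega) = none) with _ | _
          · rw [hde] at heq; simp at heq
          · rfl
        have hprev : (pvRR g w n)[k]'(by omega) = true := by
          rw [hd] at heq; simpa using heq
        refine ⟨(pvCellRow hPre hy hk).mpr ?_, Or.inr ?_⟩
        · rw [List.getElem?_eq_getElem (by omega)]
          simpa using hd
        · simp only [Nat.add_sub_cancel]
          rw [← ih (by omega) k hk]
          unfold pvAt
          rw [List.getElem?_eq_getElem (by omega), hprev]
          rfl
      · rintro ⟨hke, hreach⟩
        have hk := pvCell_lt_w hke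
        refine ⟨hk, ?_⟩
        rw [pvSeed_get hrl hpl hk]
        have hrn : PvReach g w k n := by
          rcases hreach with h0 | h0
          · cases h0
          · simpa using h0
        have hprev : (pvRR g w n)[k]'(by omega) = true := by
          have := (ih (by omega) k hk).mpr hrn
          unfold pvAt at this
          rw [List.getElem?_eq_getElem (by omega)] at this
          simpa using this
        have hcn := (pvCellRow hPre hy hk).mp hke
        rw [List.getElem?_eq_getElem (by omega)] at hcn
        have hcn' := Option.some.inj hcn
        simp [hcn', hprev]
    rw [show pvRR g w (n+1) = pvExpand (pvRowAt g w (n+1))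
        (((pvRowAt g w (n+1)).zip (pvRR g w n)).map
          (fun p => decide (p.1 = none) && (false || p.2))) from rfl]
    rw [pvExpand_iff _ _ w hrl hsl hse x hx, pvReach_iff_HC g w (n+1) x]
    have hemiff : ∀ k : Nat, (k < w ∧ (pvRowAt g w (n+1))[k]? = some none)
        ↔ (pvCell g w k (n+1) = true) := by
      intro k
      constructor
      · rintro ⟨hk, hke⟩; rw [pvCellRow hPre hy hk]; exact hke
      · intro hke
        have hk := pvCell_lt_w hke
        exact ⟨hk, (pvCellRow hPre hy hk).mp hke⟩
    constructor
    · apply pvHC_congr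
      · exact hemiff
      · exact hscell
    · apply pvHC_congr
      · exact fun k => (hemiff k).symm
      · exact fun k => (hscell k).symm

def pvCntRow (g : List (List (Option Int))) (w y : Nat) : Int :=
  ((pvRowAt g w y).zip (pvRR g w y)).foldl
    (fun a p => if p.1 = none ∧ p.2 = false then a + 1 else a) 0

lemma pvZipCnt (row : List (Option Int)) :
    ∀ (u : List Bool) (acc : Int),
      (row.zip u).foldl (fun a p => if p.1 = none ∧ p.2 = false then a + 1 else a) acc
      = acc + ((List.range (min row.length u.length)).map
          (fun x => if row[x]? = some none ∧ u[x]? = some false then (1:Int) else 0)).sum := by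
  induction row with
  | nil => intro u acc; simp
  | cons c row' ih =>
    intro u acc
    cases u with
    | nil => simp
    | cons b u' =>
      rw [List.zip_cons_cons, List.foldl_cons, ih u' _]
      have hm : min (c :: row').length (b :: u').length = min row'.length u'.length + 1 := by
        simp only [List.length_cons]
        omega
      rw [hm, List.range_succ_eq_map, List.map_cons, List.sum_cons, List.map_map]
      simp only [List.getElem?_cons_zero, Function.comp_def, Nat.succ_eq_add_one,
        List.getElem?_cons_succ]
      simp only [Option.some.injEq]
      split_ifs with h1 <;> ring_nf

lemma pvCntRow_eq (g : List (List (Option Int)))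
    (hPre : ∀ r ∈ g, (g.headD []).length ≤ r.length) {y : Nat} (hy : y < g.length) :
    pvCntRow g (g.headD []).length y
      = pvCnt g (g.headD []).length (fun x y' => pvAt (pvRR g (g.headD []).length y') x) y := by
  unfold pvCntRow pvCnt
  rw [pvZipCnt]
  have hrl := pvRowAt_length hPre hy
  have hul := pvRR_length hPre y hy
  rw [show min (pvRowAt g (g.headD []).length y).length
      (pvRR g (g.headD []).length y).length = (g.headD []).length by omega]
  rw [zero_add]
  apply congrArg List.sum
  apply List.map_congr_left
  intro x hx
  have hxw := List.mem_range.mp hx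
  have hcell := pvCellRow hPre hy hxw
  have hu : (pvRR g (g.headD []).length y)[x]? = some (pvAt (pvRR g (g.headD []).length y) x) := by
    unfold pvAt
    rw [List.getElem?_eq_getElem (by omega)]
    rfl
  apply if_congr _ rfl rfl
  rw [hu]
  constructor
  · rintro ⟨h1, h2⟩
    exact ⟨hcell.mpr h1, Option.some.inj h2⟩
  · rintro ⟨h1, h2⟩
    have h2' : pvAt (pvRR g (g.headD []).length y) x = false := h2
    exact ⟨hcell.mp h1, by rw [h2']⟩

lemma pvB_fold (g : List (List (Option Int))) :
    ∀ (rows : List (List (Option Int))) (y : Nat) (first : Bool) (reach : List Bool) (holes : Int),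
      g.drop y = rows →
      first = decide (y = 0) →
      reach = (if y = 0 then List.replicate (g.headD []).length false
               else pvRR g (g.headD []).length (y-1)) →
      (List.foldl (pvRowStep (g.headD []).length) (reach, first, holes) rows).2.2
        = holes + ((List.range (g.length - y)).map
            (fun k => pvCntRow g (g.headD []).length (y+k))).sum := by
  intro rows
  induction rows with
  | nil =>
    intro y first reach holes hdrop _ _
    have hlen : g.length ≤ y := List.drop_eq_nil_iff.mp hdrop
    rw [show g.length - y = 0 by omega]
    simp
  | cons r rest ih =>
    intro y first reach holes hdrop hfirst hreach
    have hylt : y < g.length := by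
      by_contra hy
      rw [List.drop_eq_nil_iff.mpr (by omega)] at hdrop
      cases hdrop
    have hr : r = g[y]'hylt := by
      have h0 := List.getElem?_drop (xs := g) (i := y) (j := 0)
      rw [hdrop] at h0
      simp only [List.getElem?_cons_zero, Nat.add_zero] at h0
      rw [List.getElem?_eq_getElem hylt] at h0
      exact Option.some.inj h0
    have hrest : g.drop (y+1) = rest := by
      have h1 : (g.drop y).drop 1 = g.drop (y+1) := List.drop_drop
      rw [hdrop] at h1
      simpa using h1.symm
    have hrow : r.take (g.headD []).length = pvRowAt g (g.headD []).length y := by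
      unfold pvRowAt
      rw [hr, List.getD_eq_getElem?_getD, List.getElem?_eq_getElem hylt]
      rfl
    have hstep : pvRowStep (g.headD []).length (reach, first, holes) r
        = (pvRR g (g.headD []).length y, false,
            holes + pvCntRow g (g.headD []).length y) := by
      cases y with
      | zero =>
        have hf : first = true := by rw [hfirst]; rfl
        have hrc : reach = List.replicate (g.headD []).length false := by
          rw [hreach]; rfl
        subst hf; subst hrc
        unfold pvRowStep pvCntRow
        simp only [hrow]
        rfl
      | succ n =>
        have hf : first = false := by rw [hfirst]; rfl
        have hrc : reach = pvRR g (g.headD []).length n := by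
          rw [hreach]; rfl
        subst hf; subst hrc
        unfold pvRowStep pvCntRow
        simp only [hrow]
        rfl
    rw [List.foldl_cons, hstep,
      ih (y+1) false (pvRR g (g.headD []).length y)
        (holes + pvCntRow g (g.headD []).length y) hrest rfl (by simp)]
    have hm : g.length - y = (g.length - (y+1)) + 1 := by omega
    rw [hm, List.range_succ_eq_map, List.map_cons, List.sum_cons, List.map_map]
    have hmap : (List.map ((fun k => pvCntRow g (g.headD []).length (y+k)) ∘ Nat.succ)
          (List.range (g.length - (y+1))))
        = (List.map (fun k => pvCntRow g (g.headD []).length (y+1+k))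
          (List.range (g.length - (y+1)))) := by
      apply List.map_congr_left
      intro k _
      simp only [Function.comp_def]
      have : y + (k+1) = y + 1 + k := by omega
      rw [Nat.succ_eq_add_one, this]
    rw [hmap, Nat.add_zero]
    ring_nf

theorem nb_trous_cube_B_eq (g : List (List (Option Int)))
    (_hne : g ≠ []) (hPre : ∀ r ∈ g, (g.headD []).length ≤ r.length) :
    ∃ bB : Nat → Nat → Bool,
      nb_trous_cube_alt g = pvCount g (g.headD []).length g.length bB ∧
      ∀ x y, x < (g.headD []).length → y < g.length →
        (bB x y = true ↔ PvReach g (g.headD []).length x y) := by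
  refine ⟨fun x y => pvAt (pvRR g (g.headD []).length y) x, ?_, ?_⟩
  · show (g.foldl (pvRowStep (g.headD []).length)
        (List.replicate (g.headD []).length false, true, 0)).2.2 = _
    rw [pvB_fold g g 0 true (List.replicate (g.headD []).length false) 0
      (by simp) (by simp) (by simp)]
    unfold pvCount
    rw [Nat.sub_zero, zero_add]
    apply congrArg List.sum
    apply List.map_congr_left
    intro y hy
    have hyl := List.mem_range.mp hy
    rw [Nat.zero_add]
    exact pvCntRow_eq g hPre hyl
  · intro x y hx hy
    exact pvRR_iff hPre y hy x hx

-- ===== VERDICT =====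
theorem nb_trous_cube_spec : Claim_equal_nb_trous_cube := by
  intro g _ hPre
  unfold Spec_nb_trous_cube
  obtain ⟨bB, hB, hbB⟩ := nb_trous_cube_B_eq g hPre.1 hPre.2
  rw [nb_trous_cube_A_eq g, hB]
  apply pvCount_congr
  intro x y hx hy
  have h1 := pvVusF_correct g hPre.1 hPre.2 x y
  have h2 := hbB x y hx hy
  cases hA : pvGetVN (pvVusF g) x y <;> cases hBB : bB x y <;> simp_all
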